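-- pv_equiv track=rewrite | github.com/S0okJu/BOJ | 0-9999/1000-1999/1100-1199/1105/1105.py | solution
-- ===== SOURCE A (Python) =====
-- def solution(L,R):
--     str_l = str(L)
--     str_r = str(R)
--     result = 0
--
--     # 자릿수가 다르면 무조건 0
--     if len(str_l) != len(str_r):
--         return 0
--
--     # 자릿수가 같으면
--     for i in range(len(str_l)):
--         if str_l[i] != str_r[i]:
--             break
--         else:
--             if str_l[i] =='8':
--                 result +=1
--
--     return result
-- ===== SOURCE B (Python) =====
-- def _ndigits(n):
--     d = 1
--     while n >= 10:
--         n //= 10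
--         d += 1
--     return d
--
-- def solution(L, R):
--     # pure integer arithmetic: no string conversion at all
--     if (L < 0) != (R < 0):
--         return 0
--     a, b = abs(L), abs(R)
--     k = _ndigits(a)
--     if k != _ndigits(b):
--         return 0
--     count = 0
--     while k > 0:
--         p = 10 ** (k - 1)
--         x = a // p % 10
--         y = b // p % 10
--         if x != y:
--             break
--         if x == 8:
--             count += 1
--         a %= p
--         b %= p
--         k -= 1
--     return count
-- ===== Notes on version B (the rewrite author's own statement) =====
-- stated objective: alternative
-- what changed: B never converts the numbers to strings: it works purely arithmetically, comparing signs, computing digit counts by repeated //10, and extracting digits most-significant-first via //10**(k-1) % 10 until they diverge, counting 8s.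
import Mathlib
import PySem

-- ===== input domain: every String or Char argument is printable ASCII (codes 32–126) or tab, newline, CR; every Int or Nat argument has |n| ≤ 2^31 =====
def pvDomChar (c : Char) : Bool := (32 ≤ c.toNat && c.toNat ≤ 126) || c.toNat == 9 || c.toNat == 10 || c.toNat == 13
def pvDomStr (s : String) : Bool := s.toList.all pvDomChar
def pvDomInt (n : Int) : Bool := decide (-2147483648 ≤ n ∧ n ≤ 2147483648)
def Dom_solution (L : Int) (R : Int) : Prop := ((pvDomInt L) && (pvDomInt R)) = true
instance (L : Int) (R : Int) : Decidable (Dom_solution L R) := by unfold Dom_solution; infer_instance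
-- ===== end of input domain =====

-- B avoids string conversion entirely: it compares signs, digit counts (repeated //10) and
-- digits extracted arithmetically most-significant-first; objective: alternative algorithm.

-- ===== PORT A =====
-- A's for-i loop with break over the two digit strings (lengths equal at the call site,
-- so lockstep structural recursion matches the index loop exactly).
def solutionLoopA : List Char → List Char → Int → Int
  | a :: as, b :: bs, result =>
      if a ≠ b then result
      else solutionLoopA as bs (if a = '8' then result + 1 else result)
  | _, _, result => result

def solution (L : Int) (R : Int) : Int :=
  let str_l := PySem.Int.toChars L
  let str_r := PySem.Int.toChars R
  if str_l.length ≠ str_r.length then 0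
  else solutionLoopA str_l str_r 0

-- ===== PORT B =====
-- Source B's _ndigits: d = 1; while n >= 10: n //= 10; d += 1
def ndigitsLoop (n : Int) (d : Int) : Int :=
  if h : 10 ≤ n then ndigitsLoop (PySem.Int.floordiv n 10) (d + 1) else d
termination_by n.toNat
decreasing_by
  have h10 : PySem.Int.floordiv n 10 = n / 10 := PySem.Int.floordiv_eq_ediv_of_pos (by omega)
  rw [h10]; omega

-- Source B's while k > 0 loop (10 ** (k-1) has k ≥ 1 whenever read; .toNat is exact there)
def count8Loop (a b k count : Int) : Int :=
  if h : 0 < k then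
    let p : Int := 10 ^ (k - 1).toNat
    let x := PySem.Int.mod (PySem.Int.floordiv a p) 10
    let y := PySem.Int.mod (PySem.Int.floordiv b p) 10
    if x ≠ y then count
    else count8Loop (PySem.Int.mod a p) (PySem.Int.mod b p) (k - 1)
           (if x = 8 then count + 1 else count)
  else count
termination_by k.toNat
decreasing_by omega

def solution_alt (L : Int) (R : Int) : Int :=
  if (decide (L < 0)) ≠ (decide (R < 0)) then 0
  else
    let a := |L|
    let b := |R|
    let k := ndigitsLoop a 1
    if k ≠ ndigitsLoop b 1 then 0
    else count8Loop a b k 0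

-- ===== PRECONDITION & SPEC =====
def Spec_solution (L : Int) (R : Int) (out : Int) : Prop := out = solution_alt L R
instance (L : Int) (R : Int) (out : Int) : Decidable (Spec_solution L R out) := by unfold Spec_solution; infer_instance

-- ===== CLAIM (what is proved, stated in full; the proofs are below) =====
def Claim_equal_solution : Prop := ∀ (L : Int) (R : Int), Dom_solution L R → Spec_solution L R (solution L R)

-- ===== LEMMAS AND PROOFS =====

-- big-endian digit list of a natural number, as Nat.toDigits produces it
def beDigits (n : Nat) : List Char :=
  if _h : n < 10 then [Nat.digitChar n]
  else beDigits (n / 10) ++ [Nat.digitChar (n % 10)]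
termination_by n
decreasing_by exact Nat.div_lt_self (by omega) (by omega)

def numDigits (n : Nat) : Nat :=
  if _h : n < 10 then 1 else numDigits (n / 10) + 1
termination_by n
decreasing_by exact Nat.div_lt_self (by omega) (by omega)

-- k-digit zero-padded big-endian digit list, most significant first
def padDigits : Nat → Nat → List Char
  | 0, _ => []
  | k + 1, n => Nat.digitChar (n / 10 ^ k % 10) :: padDigits k (n % 10 ^ k)

lemma toDigitsCore_eq (f : Nat) : ∀ n acc, n < f →
    Nat.toDigitsCore 10 f n acc = beDigits n ++ acc := by
  induction f with
  | zero => omega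
  | succ f ih =>
    intro n acc hn
    rw [Nat.toDigitsCore]
    by_cases h : n / 10 = 0
    · have hlt : n < 10 := by omega
      simp [h, beDigits, hlt, Nat.mod_eq_of_lt hlt]
    · have hge : ¬ n < 10 := by omega
      rw [if_neg h, ih (n / 10) _ (by omega)]
      conv_rhs => rw [beDigits]
      simp [hge]

lemma toDigits_eq_beDigits (n : Nat) : Nat.toDigits 10 n = beDigits n := by
  rw [Nat.toDigits, toDigitsCore_eq (n + 1) n [] (by omega), List.append_nil]

lemma padDigits_snoc (k : Nat) : ∀ n, padDigits k (n / 10) ++ [Nat.digitChar (n % 10)] = padDigits (k + 1) n := by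
  induction k with
  | zero => intro n; simp [padDigits]
  | succ k ih =>
    intro n
    have h1 : n / 10 / 10 ^ k = n / 10 ^ (k + 1) := by
      rw [Nat.div_div_eq_div_mul, pow_succ, mul_comm 10 (10 ^ k), mul_comm (10 ^ k) 10]
    have h2 : n / 10 % 10 ^ k = n % 10 ^ (k + 1) / 10 := by
      rw [pow_succ, mul_comm]
      exact (Nat.mod_mul_right_div_self n 10 (10 ^ k)).symm
    have h3 : n % 10 ^ (k + 1) % 10 = n % 10 :=
      Nat.mod_mod_of_dvd n (dvd_pow_self 10 (by omega))
    calc padDigits (k + 1) (n / 10) ++ [Nat.digitChar (n % 10)]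
        = Nat.digitChar (n / 10 ^ (k + 1) % 10) ::
            (padDigits k (n % 10 ^ (k + 1) / 10) ++ [Nat.digitChar (n % 10 ^ (k + 1) % 10)]) := by
          simp [padDigits, h1, h2, h3]
      _ = padDigits (k + 2) n := by rw [ih]; simp [padDigits]

lemma beDigits_eq_padDigits (n : Nat) : beDigits n = padDigits (numDigits n) n := by
  induction n using Nat.strong_induction_on with
  | _ n ih =>
    by_cases h : n < 10
    · rw [beDigits, numDigits]; simp [h, padDigits, Nat.mod_eq_of_lt h]
    · rw [beDigits, numDigits]
      simp only [h, dite_false]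
      rw [ih (n / 10) (Nat.div_lt_self (by omega) (by omega))]
      exact padDigits_snoc _ n

lemma padDigits_length (k : Nat) (n : Nat) : (padDigits k n).length = k := by
  induction k generalizing n with
  | zero => simp [padDigits]
  | succ k ih => simp [padDigits, ih]

lemma digitChar_inj : ∀ x < 10, ∀ y < 10, (Nat.digitChar x = Nat.digitChar y ↔ x = y) := by decide

lemma digitChar_ne_dash : ∀ x < 10, Nat.digitChar x ≠ '-' := by decide

lemma digitChar_eq_eight : ∀ x < 10, (Nat.digitChar x = '8' ↔ x = 8) := by decide

-- the two loops agree on the padded digit lists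
lemma loop_eq (k : Nat) : ∀ (a b : Nat) (c : Int),
    solutionLoopA (padDigits k a) (padDigits k b) c = count8Loop (a : Int) (b : Int) (k : Int) c := by
  induction k with
  | zero =>
    intro a b c
    rw [count8Loop]
    simp [padDigits, solutionLoopA]
  | succ k ih =>
    intro a b c
    have hx10 : a / 10 ^ k % 10 < 10 := Nat.mod_lt _ (by omega)
    have hy10 : b / 10 ^ k % 10 < 10 := Nat.mod_lt _ (by omega)
    rw [count8Loop, dif_pos (by push_cast; omega)]
    have hcast : (((k + 1 : Nat) : Int) - 1).toNat = k := by omega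
    simp only [hcast]
    have hpow : ((10 : Int) ^ k) = ((10 ^ k : Nat) : Int) := by push_cast; ring
    rw [hpow, PySem.Int.floordiv_natCast a (10 ^ k), PySem.Int.floordiv_natCast b (10 ^ k),
        PySem.Int.mod_natCast a (10 ^ k), PySem.Int.mod_natCast b (10 ^ k)]
    have hma : PySem.Int.mod ((a / 10 ^ k : Nat) : Int) 10 = ((a / 10 ^ k % 10 : Nat) : Int) := by
      exact_mod_cast PySem.Int.mod_natCast (a / 10 ^ k) 10
    have hmb : PySem.Int.mod ((b / 10 ^ k : Nat) : Int) 10 = ((b / 10 ^ k % 10 : Nat) : Int) := by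
      exact_mod_cast PySem.Int.mod_natCast (b / 10 ^ k) 10
    rw [hma, hmb]
    simp only [padDigits, solutionLoopA]
    have hcast2 : ((k + 1 : Nat) : Int) - 1 = (k : Int) := by omega
    rw [hcast2]
    by_cases hxy : a / 10 ^ k % 10 = b / 10 ^ k % 10
    · rw [hxy]
      rw [if_neg (show ¬(Nat.digitChar (b / 10 ^ k % 10) ≠ Nat.digitChar (b / 10 ^ k % 10))
            from not_not_intro rfl)]
      rw [if_neg (show ¬(((b / 10 ^ k % 10 : Nat) : Int) ≠ ((b / 10 ^ k % 10 : Nat) : Int))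
            from not_not_intro rfl)]
      rw [ih]
      congr 1
      by_cases h8 : b / 10 ^ k % 10 = 8
      · rw [if_pos (by rw [h8]; decide), if_pos (by exact_mod_cast h8)]
      · rw [if_neg (fun hc => h8 ((digitChar_eq_eight _ hy10).mp hc)),
            if_neg (by intro hc; exact h8 (by exact_mod_cast hc))]
    · rw [if_pos (fun hc => hxy ((digitChar_inj _ hx10 _ hy10).mp hc))]
      rw [if_pos (by intro hc; exact hxy (by exact_mod_cast hc))]

lemma ndigitsLoop_natCast (n : Nat) : ∀ d : Int, ndigitsLoop (n : Int) d = d + (numDigits n : Int) - 1 := by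
  induction n using Nat.strong_induction_on with
  | _ n ih =>
    intro d
    by_cases h : n < 10
    · have hc : ¬ (10 : Int) ≤ (n : Int) := by exact_mod_cast Nat.not_le.mpr h
      rw [ndigitsLoop, dif_neg hc, numDigits, dif_pos h]
      omega
    · have hc : (10 : Int) ≤ (n : Int) := by exact_mod_cast Nat.not_lt.mp h
      rw [ndigitsLoop, dif_pos hc]
      have hfd : PySem.Int.floordiv (n : Int) 10 = ((n / 10 : Nat) : Int) := by
        exact_mod_cast PySem.Int.floordiv_natCast n 10
      rw [hfd, ih (n / 10) (Nat.div_lt_self (by omega) (by omega))]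
      conv_rhs => rw [numDigits]
      rw [dif_neg h]
      push_cast; omega

lemma toChars_nonneg (n : Nat) : PySem.Int.toChars (n : Int) = padDigits (numDigits n) n := by
  rw [PySem.Int.toChars, if_neg (by omega)]
  have h : ((n : Int)).toNat = n := rfl
  rw [h, toDigits_eq_beDigits, beDigits_eq_padDigits]

lemma toChars_neg (n : Int) (h : n < 0) :
    PySem.Int.toChars n = '-' :: padDigits (numDigits n.natAbs) n.natAbs := by
  rw [PySem.Int.toChars, if_pos h, toDigits_eq_beDigits, beDigits_eq_padDigits]

lemma numDigits_pos (n : Nat) : 0 < numDigits n := by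
  rw [numDigits]; split <;> omega

lemma padDigits_head_ne_dash (k n : Nat) (hk : 0 < k) :
    ∀ c : List Char, padDigits k n = '-' :: c → False := by
  cases k with
  | zero => omega
  | succ k =>
    intro c h
    simp only [padDigits, List.cons.injEq] at h
    exact digitChar_ne_dash _ (Nat.mod_lt _ (by omega)) h.1

-- ===== VERDICT (by name: the statement is the Claim_ definition above) =====
theorem solution_spec : Claim_equal_solution := by
  intro L R _
  unfold Spec_solution solution solution_alt
  dsimp only
  by_cases hL : L < 0 <;> by_cases hR : R < 0
  · -- both negative
    have hsign : ¬(decide (L < 0) ≠ decide (R < 0)) := by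
      rw [decide_eq_true hL, decide_eq_true hR]; simp
    rw [if_neg hsign, toChars_neg L hL, toChars_neg R hR, abs_of_neg hL, abs_of_neg hR]
    have hLa : -L = ((L.natAbs : Nat) : Int) := by omega
    have hRa : -R = ((R.natAbs : Nat) : Int) := by omega
    rw [hLa, hRa, ndigitsLoop_natCast, ndigitsLoop_natCast]
    have hk1 : (1 : Int) + (numDigits L.natAbs : Int) - 1 = (numDigits L.natAbs : Int) := by omega
    have hk2 : (1 : Int) + (numDigits R.natAbs : Int) - 1 = (numDigits R.natAbs : Int) := by omega
    rw [hk1, hk2]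
    simp only [List.length_cons, padDigits_length]
    by_cases hn : numDigits L.natAbs = numDigits R.natAbs
    · have hA : ¬(numDigits L.natAbs + 1 ≠ numDigits R.natAbs + 1) := not_not_intro (by omega)
      have hB : ¬((numDigits L.natAbs : Int) ≠ (numDigits R.natAbs : Int)) :=
        not_not_intro (by exact_mod_cast hn)
      rw [if_neg hA, if_neg hB]
      rw [show solutionLoopA ('-' :: padDigits (numDigits L.natAbs) L.natAbs)
            ('-' :: padDigits (numDigits R.natAbs) R.natAbs) 0
            = solutionLoopA (padDigits (numDigits L.natAbs) L.natAbs)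
                (padDigits (numDigits R.natAbs) R.natAbs) 0 from by simp [solutionLoopA]]
      rw [hn, loop_eq]
    · have hA : numDigits L.natAbs + 1 ≠ numDigits R.natAbs + 1 := by omega
      have hB : (numDigits L.natAbs : Int) ≠ (numDigits R.natAbs : Int) := by exact_mod_cast hn
      rw [if_pos hA, if_pos hB]
  · -- L < 0 ≤ R : B returns 0; A returns 0 whether or not the lengths agree
    have hsign : decide (L < 0) ≠ decide (R < 0) := by
      rw [decide_eq_true hL, decide_eq_false hR]; simp
    rw [if_pos hsign, toChars_neg L hL]
    have hRn : R = ((R.toNat : Nat) : Int) := by omega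
    rw [hRn, toChars_nonneg]
    by_cases hlen : ('-' :: padDigits (numDigits L.natAbs) L.natAbs).length
        ≠ (padDigits (numDigits R.toNat) R.toNat).length
    · rw [if_pos hlen]
    · rw [if_neg hlen]
      rcases hp : padDigits (numDigits R.toNat) R.toNat with _ | ⟨c, cs⟩
      · exfalso
        have h1 := padDigits_length (numDigits R.toNat) R.toNat
        rw [hp] at h1
        have h2 := numDigits_pos R.toNat
        simp at h1
        omega
      · rw [show solutionLoopA ('-' :: padDigits (numDigits L.natAbs) L.natAbs) (c :: cs) 0
              = if '-' ≠ c then 0 else solutionLoopA (padDigits (numDigits L.natAbs) L.natAbs) cs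
                  (if '-' = '8' then 0 + 1 else 0) from rfl]
        rw [if_pos (show '-' ≠ c from fun hc =>
            padDigits_head_ne_dash _ R.toNat (numDigits_pos R.toNat) cs (by rw [hp, ← hc]))]
  · -- R < 0 ≤ L : symmetric
    have hsign : decide (L < 0) ≠ decide (R < 0) := by
      rw [decide_eq_false hL, decide_eq_true hR]; simp
    rw [if_pos hsign, toChars_neg R hR]
    have hLn : L = ((L.toNat : Nat) : Int) := by omega
    rw [hLn, toChars_nonneg]
    by_cases hlen : (padDigits (numDigits L.toNat) L.toNat).length
        ≠ ('-' :: padDigits (numDigits R.natAbs) R.natAbs).length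
    · rw [if_pos hlen]
    · rw [if_neg hlen]
      rcases hp : padDigits (numDigits L.toNat) L.toNat with _ | ⟨c, cs⟩
      · exfalso
        have h1 := padDigits_length (numDigits L.toNat) L.toNat
        rw [hp] at h1
        have h2 := numDigits_pos L.toNat
        simp at h1
        omega
      · rw [show solutionLoopA (c :: cs) ('-' :: padDigits (numDigits R.natAbs) R.natAbs) 0
              = if c ≠ '-' then 0 else solutionLoopA cs (padDigits (numDigits R.natAbs) R.natAbs)
                  (if c = '8' then 0 + 1 else 0) from rfl]
        rw [if_pos (show c ≠ '-' from fun hc =>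
            padDigits_head_ne_dash _ L.toNat (numDigits_pos L.toNat) cs (by rw [hp, hc]))]
  · -- both nonnegative
    have hsign : ¬(decide (L < 0) ≠ decide (R < 0)) := by
      rw [decide_eq_false hL, decide_eq_false hR]; simp
    rw [if_neg hsign, abs_of_nonneg (by omega : (0:Int) ≤ L),
        abs_of_nonneg (by omega : (0:Int) ≤ R)]
    have hLn : L = ((L.toNat : Nat) : Int) := by omega
    have hRn : R = ((R.toNat : Nat) : Int) := by omega
    rw [hLn, hRn, toChars_nonneg, toChars_nonneg, ndigitsLoop_natCast, ndigitsLoop_natCast]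
    have hk1 : (1 : Int) + (numDigits L.toNat : Int) - 1 = (numDigits L.toNat : Int) := by omega
    have hk2 : (1 : Int) + (numDigits R.toNat : Int) - 1 = (numDigits R.toNat : Int) := by omega
    rw [hk1, hk2]
    simp only [padDigits_length]
    by_cases hn : numDigits L.toNat = numDigits R.toNat
    · have hA : ¬(numDigits L.toNat ≠ numDigits R.toNat) := not_not_intro hn
      have hB : ¬((numDigits L.toNat : Int) ≠ (numDigits R.toNat : Int)) :=
        not_not_intro (by exact_mod_cast hn)
      rw [if_neg hA, if_neg hB, hn, loop_eq]
    · have hB : (numDigits L.toNat : Int) ≠ (numDigits R.toNat : Int) := by exact_mod_cast hn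
      rw [if_pos hn, if_pos hB]
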